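-- pv_equiv track=rewrite | github.com/laanwj/etna_viv | tools/etnaviv/floatutil.py | float16_decompress
-- ===== SOURCE A (Python) =====
-- def float16_decompress(float16):
--     s = int((float16 >> 15) & 0x00000001)    # sign
--     e = int((float16 >> 10) & 0x0000001f)    # exponent
--     f = int(float16 & 0x000003ff)            # fraction
--
--     if e == 0:
--         if f == 0:
--             return int(s << 31)
--         else:
--             while not (f & 0x00000400):
--                 f = f << 1
--                 e -= 1
--             e += 1
--             f &= ~0x00000400
--     elif e == 31:
--         if f == 0:
--             return int((s << 31) | 0x7f800000)
--         else:
--             return int((s << 31) | 0x7f800000 | (f << 13))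
--
--     e = e + (127 - 15)
--     f = f << 13
--     return int((s << 31) | (e << 23) | f)
-- ===== SOURCE B (Python) =====
-- def float16_decompress(float16):
--     s = (float16 >> 15) & 1
--     e = (float16 >> 10) & 0x1f
--     f = float16 & 0x3ff
--     if e == 31:
--         return (s << 31) | 0x7f800000 | (f << 13)
--     if e == 0:
--         if f == 0:
--             return s << 31
--         n = f.bit_length()
--         return (s << 31) | ((n + 102) << 23) | (((f << (11 - n)) & 0x3ff) << 13)
--     return (s << 31) | ((e + 112) << 23) | (f << 13)
-- ===== Notes on version B (the rewrite author's own statement) =====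
-- stated objective: simpler
-- what changed: The subnormal while-loop normalization is replaced by a closed form using f.bit_length() (exponent and shift computed directly), and the shared fall-through tail is folded into each branch as a single return expression.
import Mathlib
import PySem

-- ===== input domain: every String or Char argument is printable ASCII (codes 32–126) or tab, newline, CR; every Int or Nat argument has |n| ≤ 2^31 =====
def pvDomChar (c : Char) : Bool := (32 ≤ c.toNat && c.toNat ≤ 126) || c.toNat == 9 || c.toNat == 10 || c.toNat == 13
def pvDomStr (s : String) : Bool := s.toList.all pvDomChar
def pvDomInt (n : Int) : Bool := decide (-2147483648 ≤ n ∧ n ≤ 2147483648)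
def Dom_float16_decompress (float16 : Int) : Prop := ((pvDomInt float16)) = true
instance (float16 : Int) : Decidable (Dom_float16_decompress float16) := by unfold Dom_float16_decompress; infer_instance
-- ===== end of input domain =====

-- B replaces A's subnormal while-loop normalization by a closed form using f.bit_length(); objective: simpler (loop-free).

-- ===== PORT A =====
-- A's `while not (f & 0x400): f <<= 1; e -= 1`: fuel-bounded recursion; fuel 11 suffices
-- for every reachable f (1 ≤ f ≤ 0x3ff), so the fuel guard only makes the loop total.
def f16_normLoop : Nat → Int → Int → Int × Int
  | 0, f, e => (f, e)
  | n + 1, f, e =>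
      if PySem.Int.band f 1024 = 0 then f16_normLoop n (f <<< 1) (e - 1) else (f, e)

def float16_decompress (float16 : Int) : Int :=
  let s := PySem.Int.band (float16 >>> (15 : Nat)) 1
  let e := PySem.Int.band (float16 >>> (10 : Nat)) 31
  let f := PySem.Int.band float16 1023
  if e = 0 then
    if f = 0 then s <<< 31
    else
      let (f, e) := f16_normLoop 11 f e
      let e := e + 1
      let f := PySem.Int.band f (Int.not 1024)
      let e := e + (127 - 15)
      let f := f <<< 13
      PySem.Int.bor (PySem.Int.bor (s <<< 31) (e <<< 23)) f
  else if e = 31 then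
    if f = 0 then PySem.Int.bor (s <<< 31) 0x7f800000
    else PySem.Int.bor (PySem.Int.bor (s <<< 31) 0x7f800000) (f <<< 13)
  else
    let e := e + (127 - 15)
    let f := f <<< 13
    PySem.Int.bor (PySem.Int.bor (s <<< 31) (e <<< 23)) f

-- ===== PORT B =====
def float16_decompress_alt (float16 : Int) : Int :=
  let s := PySem.Int.band (float16 >>> (15 : Nat)) 1
  let e := PySem.Int.band (float16 >>> (10 : Nat)) 31
  let f := PySem.Int.band float16 1023
  if e = 31 then
    PySem.Int.bor (PySem.Int.bor (s <<< 31) 0x7f800000) (f <<< 13)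
  else if e = 0 then
    if f = 0 then s <<< 31
    else
      let n : Nat := PySem.Int.bitLength f
      PySem.Int.bor (PySem.Int.bor (s <<< 31) (((n : Int) + 102) <<< 23))
        ((PySem.Int.band (f <<< (11 - n)) 1023) <<< 13)
  else
    PySem.Int.bor (PySem.Int.bor (s <<< 31) ((e + 112) <<< 23)) (f <<< 13)

-- ===== PRECONDITION & SPEC =====
def Spec_float16_decompress (float16 : Int) (out : Int) : Prop := out = float16_decompress_alt float16
instance (float16 : Int) (out : Int) : Decidable (Spec_float16_decompress float16 out) := by unfold Spec_float16_decompress; infer_instance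

-- ===== CLAIM (what is proved, stated in full; the proofs are below) =====
def Claim_equal_float16_decompress : Prop := ∀ (float16 : Int), Dom_float16_decompress float16 → Spec_float16_decompress float16 (float16_decompress float16)

-- ===== LEMMAS AND PROOFS =====

lemma sr10 (m : Int) : m >>> (10 : Nat) = m / 1024 := by
  cases m with
  | ofNat n =>
      show Int.ofNat (n >>> 10) = _
      rw [Nat.shiftRight_eq_div_pow]
      simp [Int.ofNat_eq_natCast]
  | negSucc n =>
      show Int.negSucc (n >>> 10) = _
      rw [Nat.shiftRight_eq_div_pow, Int.negSucc_eq, Int.negSucc_eq]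
      push_cast
      omega

lemma sr15 (m : Int) : m >>> (15 : Nat) = m / 32768 := by
  cases m with
  | ofNat n =>
      show Int.ofNat (n >>> 15) = _
      rw [Nat.shiftRight_eq_div_pow]
      simp [Int.ofNat_eq_natCast]
  | negSucc n =>
      show Int.negSucc (n >>> 15) = _
      rw [Nat.shiftRight_eq_div_pow, Int.negSucc_eq, Int.negSucc_eq]
      push_cast
      omega

lemma band_mask1 (a : Int) : PySem.Int.band a 1 = a % 2 := by
  rw [PySem.Int.band_one]
  exact PySem.Int.mod_eq_emod_of_pos (by norm_num)

lemma band_mask31 (a : Int) : PySem.Int.band a 31 = a % 32 := by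
  unfold PySem.Int.band
  by_cases ha : 0 ≤ a
  · simp only [ha, if_pos, show (0:Int) ≤ 31 by norm_num]
    rw [show (31:Int).toNat = 2 ^ 5 - 1 from rfl, Nat.and_two_pow_sub_one_eq_mod]
    omega
  · simp only [ha, if_pos, show (0:Int) ≤ 31 by norm_num, if_false]
    rw [Nat.and_comm, show (31:Int).toNat = 2 ^ 5 - 1 from rfl, Nat.and_two_pow_sub_one_eq_mod]
    omega

lemma band_mask1023 (a : Int) : PySem.Int.band a 1023 = a % 1024 := by
  unfold PySem.Int.band
  by_cases ha : 0 ≤ a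
  · simp only [ha, if_pos, show (0:Int) ≤ 1023 by norm_num]
    rw [show (1023:Int).toNat = 2 ^ 10 - 1 from rfl, Nat.and_two_pow_sub_one_eq_mod]
    omega
  · simp only [ha, if_pos, show (0:Int) ≤ 1023 by norm_num, if_false]
    rw [Nat.and_comm, show (1023:Int).toNat = 2 ^ 10 - 1 from rfl, Nat.and_two_pow_sub_one_eq_mod]
    omega

-- the subnormal branch: loop normalization = bit_length closed form, on all reachable (s, f)
set_option maxRecDepth 20000 in
lemma subnormal_dec : ∀ sn : Nat, sn < 2 → ∀ fn : Nat, fn < 1024 → 0 < fn →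
    PySem.Int.bor
        (PySem.Int.bor (((sn : Int)) <<< 31)
          (((f16_normLoop 11 (fn : Int) 0).2 + 1 + (127 - 15)) <<< 23))
        (PySem.Int.band (f16_normLoop 11 (fn : Int) 0).1 (Int.not 1024) <<< 13) =
    PySem.Int.bor
        (PySem.Int.bor (((sn : Int)) <<< 31)
          (((PySem.Int.bitLength (fn : Int) : Int) + 102) <<< 23))
      ((((fn : Int) <<< (11 - PySem.Int.bitLength (fn : Int))) % 1024) <<< 13) := by
  decide

-- ===== VERDICT (by name: the statement is the Claim_ definition above) =====
theorem float16_decompress_spec : Claim_equal_float16_decompress := by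
  intro a _
  show float16_decompress a = float16_decompress_alt a
  simp only [float16_decompress, float16_decompress_alt, sr10, sr15, band_mask1, band_mask31,
    band_mask1023]
  have hf0 : 0 ≤ a % 1024 := Int.emod_nonneg _ (by norm_num)
  have hf1 : a % 1024 < 1024 := Int.emod_lt_of_pos _ (by norm_num)
  have hs0 : 0 ≤ a / 32768 % 2 := Int.emod_nonneg _ (by norm_num)
  have hs1 : a / 32768 % 2 < 2 := Int.emod_lt_of_pos _ (by norm_num)
  by_cases he : a / 1024 % 32 = 0
  · by_cases hf : a % 1024 = 0
    · rw [he, hf]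
      norm_num
    · rw [he]
      rw [if_pos rfl, if_neg hf, if_neg (show (0:Int) ≠ 31 by norm_num), if_pos rfl, if_neg hf]
      have := subnormal_dec (a / 32768 % 2).toNat (by omega) (a % 1024).toNat (by omega) (by omega)
      rwa [Int.toNat_of_nonneg hs0, Int.toNat_of_nonneg hf0] at this
  · by_cases h31 : a / 1024 % 32 = 31
    · rw [h31]
      rw [if_neg (show (31:Int) ≠ 0 by norm_num), if_pos rfl, if_pos rfl]
      by_cases hf : a % 1024 = 0
      · rw [if_pos hf, hf]
        rw [show ((0:Int) <<< 13) = 0 from rfl, PySem.Int.bor_zero]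
      · rw [if_neg hf]
    · rw [if_neg he, if_neg h31, if_neg h31, if_neg he]
      norm_num
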